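-- pv_equiv track=rewrite | github.com/dfannius/chesstools | perf.py | xtbl_indices
-- ===== SOURCE A (Python) =====
-- def xtbl_indices( xtbls ):
--     mapping = {}
--     for (i, x) in enumerate( xtbls ):
--         mapping[x] = i          # overwrite earlier indices with later ones
--     vals = []
--     for (k, v) in mapping.items():
--         vals.append( (v, k) )
--     return sorted( vals )
-- ===== SOURCE B (Python) =====
-- def xtbl_indices(xtbls):
--     # One backward pass: the first time we meet an element (scanning right to
--     # left) is its last occurrence; indices are visited in decreasing order,
--     # so reversing the collected list yields the index-sorted result directly.
--     seen = set()
--     out = []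
--     for (i, x) in reversed(list(enumerate(xtbls))):
--         if x not in seen:
--             seen.add(x)
--             out.append((i, x))
--     out.reverse()
--     return out
-- ===== Notes on version B (the rewrite author's own statement) =====
-- stated objective: alternative
-- what changed: Replaces the dict-of-last-indices plus final sort by a single backward pass with a seen-set that collects each element at its last occurrence in decreasing index order and reverses once, so no sort is needed.
import Mathlib
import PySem

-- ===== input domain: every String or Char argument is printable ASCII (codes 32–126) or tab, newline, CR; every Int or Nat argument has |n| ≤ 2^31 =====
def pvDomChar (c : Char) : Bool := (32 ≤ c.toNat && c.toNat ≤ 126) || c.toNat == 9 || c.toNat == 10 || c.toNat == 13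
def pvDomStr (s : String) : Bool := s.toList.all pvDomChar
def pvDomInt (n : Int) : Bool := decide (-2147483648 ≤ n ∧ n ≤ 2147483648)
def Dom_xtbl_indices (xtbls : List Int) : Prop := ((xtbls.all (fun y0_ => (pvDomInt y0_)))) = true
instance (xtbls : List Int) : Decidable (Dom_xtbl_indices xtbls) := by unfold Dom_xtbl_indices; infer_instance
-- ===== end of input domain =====

-- B replaces A's dict-of-last-indices + final sort by a single backward pass with a
-- seen-set, collecting each element at its last occurrence and reversing once (no sort).

-- ===== PORT A =====
def xtbl_indices (xtbls : List Int) : List (Int × Int) :=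
  let mapping : PySem.Dict Int Int :=
    (PySem.List.enumerate xtbls).foldl (fun d p => d.insert p.2 p.1) PySem.Dict.empty
  let vals : List (Int × Int) :=
    mapping.items.foldl (fun acc p => acc ++ [(p.2, p.1)]) []
  PySem.List.sorted2 vals (fun v => v.1) (fun v => v.2) false

-- ===== PORT B =====
def xtbl_indices_alt (xtbls : List Int) : List (Int × Int) :=
  let st := (PySem.List.enumerate xtbls).reverse.foldl
    (fun (st : PySem.Set Int × List (Int × Int)) p =>
      if p.2 ∈ st.1 then st else (st.1.add p.2, st.2 ++ [p]))
    ((PySem.Set.ofList []), [])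
  st.2.reverse

-- ===== PRECONDITION & SPEC =====
def Spec_xtbl_indices (xtbls : List Int) (out : List (Int × Int)) : Prop := out = xtbl_indices_alt xtbls
instance (xtbls : List Int) (out : List (Int × Int)) : Decidable (Spec_xtbl_indices xtbls out) := by unfold Spec_xtbl_indices; infer_instance

-- ===== CLAIM (what is proved, stated in full; the proofs are below) =====
def Claim_equal_xtbl_indices : Prop := ∀ (xtbls : List Int), Dom_xtbl_indices xtbls → Spec_xtbl_indices xtbls (xtbl_indices xtbls)

-- ===== LEMMAS AND PROOFS =====

-- proof-side model of B's loop: keep the first occurrence of each second component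
def pickFirst : List Int → List (Int × Int) → List (Int × Int)
  | _, [] => []
  | s, p :: t => if p.2 ∈ s then pickFirst s t else p :: pickFirst (p.2 :: s) t

theorem pickFirst_congr (s s' : List Int) (l : List (Int × Int))
    (h : ∀ x, x ∈ s ↔ x ∈ s') : pickFirst s l = pickFirst s' l := by
  induction l generalizing s s' with
  | nil => rfl
  | cons p t ih =>
    simp only [pickFirst]
    by_cases hp : p.2 ∈ s
    · rw [if_pos hp, if_pos ((h p.2).mp hp), ih s s' h]
    · rw [if_neg hp, if_neg (fun hc => hp ((h p.2).mpr hc)),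
        ih (p.2 :: s) (p.2 :: s') (by intro x; simp [h x])]

theorem foldB_snd (l : List (Int × Int)) (s : PySem.Set Int) (acc : List (Int × Int)) :
    (l.foldl (fun (st : PySem.Set Int × List (Int × Int)) p =>
      if p.2 ∈ st.1 then st else (st.1.add p.2, st.2 ++ [p])) (s, acc)).2
    = acc ++ pickFirst s l := by
  induction l generalizing s acc with
  | nil => simp [pickFirst]
  | cons p t ih =>
    simp only [List.foldl_cons, pickFirst]
    by_cases hp : p.2 ∈ s
    · rw [if_pos hp, if_pos hp, ih]
    · rw [if_neg hp, if_neg hp, ih]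
      rw [pickFirst_congr (PySem.Set.add s p.2) (p.2 :: s) t
        (by intro x; rw [PySem.Set.mem_add]; simp [or_comm])]
      simp

theorem pickFirst_sublist (s : List Int) (l : List (Int × Int)) :
    (pickFirst s l).Sublist l := by
  induction l generalizing s with
  | nil => simp [pickFirst]
  | cons p t ih =>
    simp only [pickFirst]
    by_cases hp : p.2 ∈ s
    · rw [if_pos hp]; exact (ih s).cons p
    · rw [if_neg hp]; exact (ih (p.2 :: s)).cons₂ p

theorem mem_pickFirst (s : List Int) (l : List (Int × Int)) (p : Int × Int) :
    p ∈ pickFirst s l ↔ p.2 ∉ s ∧ l.find? (fun q => q.2 == p.2) = some p := by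
  induction l generalizing s with
  | nil => simp [pickFirst]
  | cons q t ih =>
    simp only [pickFirst]
    by_cases he : (q.2 == p.2) = true
    · have h2 : p.2 = q.2 := (eq_of_beq he).symm
      rw [List.find?_cons_of_pos (by exact he)]
      by_cases hq : q.2 ∈ s
      · rw [if_pos hq, ih]
        have hps : p.2 ∈ s := h2 ▸ hq
        constructor
        · rintro ⟨hns, _⟩; exact absurd hps hns
        · rintro ⟨hns, _⟩; exact absurd hps hns
      · rw [if_neg hq]
        simp only [List.mem_cons, ih, List.mem_cons]
        constructor
        · rintro (rfl | ⟨hns, _⟩)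
          · exact ⟨h2 ▸ hq, rfl⟩
          · exact absurd (Or.inl h2) hns
        · rintro ⟨_, hf⟩
          injection hf with h; exact Or.inl h.symm
    · have h2 : ¬ p.2 = q.2 := fun h => he (by simp [h])
      rw [List.find?_cons_of_neg (by exact he)]
      by_cases hq : q.2 ∈ s
      · rw [if_pos hq, ih]
      · rw [if_neg hq]
        simp only [List.mem_cons, ih, List.mem_cons]
        constructor
        · rintro (rfl | ⟨hns, hf⟩)
          · exact absurd rfl h2
          · exact ⟨fun hc => hns (Or.inr hc), hf⟩
        · rintro ⟨hns, hf⟩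
          exact Or.inr ⟨fun hc => hc.elim h2 hns, hf⟩

theorem get?_fold_insert (l : List (Int × Int)) (d : PySem.Dict Int Int) (k : Int) :
    (l.foldl (fun d p => d.insert p.2 p.1) d).get? k
    = (l.reverse.find? (fun q => q.2 == k)).elim (d.get? k) (fun p => some p.1) := by
  induction l generalizing d with
  | nil => simp
  | cons p t ih =>
    simp only [List.foldl_cons, List.reverse_cons, List.find?_append, ih]
    cases hf : t.reverse.find? (fun q => q.2 == k) with
    | some q => simp
    | none =>
      simp only [Option.none_or]
      by_cases hk : (p.2 == k) = true
      · rw [List.find?_cons_of_pos (by exact hk), PySem.Dict.get?_insert]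
        have : k = p.2 := (eq_of_beq hk).symm
        simp [this]
      · rw [List.find?_cons_of_neg (by exact hk), PySem.Dict.get?_insert]
        have : ¬ k = p.2 := fun h => hk (by simp [h])
        simp [this]

-- lexicographic before-test that sorted2 uses (reverse = false)
def lexlt (a b : Int × Int) : Bool :=
  decide (a.1 < b.1) || (!decide (b.1 < a.1) && decide (a.2 < b.2))

theorem insertBy_lexlt_pairwise (x : Int × Int) (ys : List (Int × Int))
    (h : ys.Pairwise (fun a b => a.1 ≤ b.1)) :
    (PySem.List.insertBy lexlt x ys).Pairwise (fun a b => a.1 ≤ b.1) := by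
  induction ys with
  | nil => simp [PySem.List.insertBy]
  | cons y t ih =>
    rw [List.pairwise_cons] at h
    rw [PySem.List.insertBy]
    by_cases hb : lexlt x y = true
    · rw [if_pos hb]
      have hxy : x.1 ≤ y.1 := by
        simp only [lexlt, Bool.or_eq_true, Bool.and_eq_true, decide_eq_true_eq,
          Bool.not_eq_true', decide_eq_false_iff_not] at hb
        rcases hb with h1 | ⟨h1, _⟩ <;> omega
      refine List.Pairwise.cons ?_ (List.Pairwise.cons h.1 h.2)
      intro z hz
      rcases List.mem_cons.mp hz with rfl | hz
      · exact hxy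
      · exact le_trans hxy (h.1 z hz)
    · rw [if_neg hb]
      have hyx : y.1 ≤ x.1 := by
        simp only [lexlt, Bool.or_eq_true, Bool.and_eq_true, decide_eq_true_eq,
          Bool.not_eq_true', decide_eq_false_iff_not] at hb
        omega
      refine List.Pairwise.cons ?_ (ih h.2)
      intro z hz
      rcases (PySem.List.mem_insertBy lexlt x z t).mp hz with rfl | hz
      · exact hyx
      · exact h.1 z hz

theorem foldl_insertBy_lexlt_pairwise (xs acc : List (Int × Int))
    (h : acc.Pairwise (fun a b => a.1 ≤ b.1)) :
    (xs.foldl (fun acc x => PySem.List.insertBy lexlt x acc) acc).Pairwise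
      (fun a b => a.1 ≤ b.1) := by
  induction xs generalizing acc with
  | nil => exact h
  | cons x t ih => exact ih _ (insertBy_lexlt_pairwise x acc h)

theorem sorted2_fst_pairwise (xs : List (Int × Int)) :
    (PySem.List.sorted2 xs (fun v => v.1) (fun v => v.2) false).Pairwise
      (fun a b => a.1 ≤ b.1) := by
  have : PySem.List.sorted2 xs (fun v => v.1) (fun v => v.2) false
      = xs.foldl (fun acc x => PySem.List.insertBy lexlt x acc) [] := rfl
  rw [this]
  exact foldl_insertBy_lexlt_pairwise xs [] (by simp)

-- ===== VERDICT (by name: the statement is the Claim_ definition above) =====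
theorem xtbl_indices_spec : Claim_equal_xtbl_indices := by
  intro xtbls _
  unfold Spec_xtbl_indices xtbl_indices xtbl_indices_alt
  simp only [PySem.List.foldl_append_singleton_eq_map, List.nil_append]
  set e := PySem.List.enumerate xtbls with he
  set r := e.reverse with hr
  set mapping := e.foldl (fun d p => d.insert p.2 p.1) PySem.Dict.empty with hm
  -- B side in terms of pickFirst
  rw [foldB_snd]
  have hnodk : mapping.keys.Nodup := by
    rw [hm]
    exact PySem.Dict.nodup_keys_foldl_insert_key e (fun p => p.2) (fun d p => p.1)
      PySem.Dict.empty (by simp)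
  -- membership characterisation shared by both sides
  have hmemA : ∀ v : Int × Int,
      v ∈ mapping.items.map (fun p => (p.2, p.1)) ↔
        r.find? (fun q => q.2 == v.2) = some v := by
    intro v
    constructor
    · rintro hv
      rcases List.mem_map.mp hv with ⟨a, ha, rfl⟩
      have : mapping.get? a.1 = some a.2 :=
        (PySem.Dict.get?_eq_some_iff_mem_items mapping a.1 a.2 hnodk).mpr ha
      rw [hm, get?_fold_insert, PySem.Dict.get?_empty, ← hr] at this
      cases hf : r.find? (fun q => q.2 == a.1) with
      | none => rw [hf] at this; simp at this
      | some p =>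
        rw [hf] at this
        simp only [Option.elim, Option.some.injEq] at this
        have hp2 : p.2 = a.1 := by
          have := List.find?_some hf; simpa using this
        have : p = (a.2, a.1) := Prod.ext this hp2
        rw [← this]
    · intro hf
      have hv2 : mapping.get? v.2 = some v.1 := by
        rw [hm, get?_fold_insert, PySem.Dict.get?_empty, ← hr, hf]; rfl
      have : (v.2, v.1) ∈ mapping.items :=
        (PySem.Dict.get?_eq_some_iff_mem_items mapping v.2 v.1 hnodk).mp hv2
      exact List.mem_map.mpr ⟨(v.2, v.1), this, rfl⟩
  have hmemB : ∀ v : Int × Int,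
      v ∈ (pickFirst (PySem.Set.ofList []) r).reverse ↔
        r.find? (fun q => q.2 == v.2) = some v := by
    intro v
    rw [List.mem_reverse, mem_pickFirst]
    simp [PySem.Set.ofList]
  -- Nodup on both sides
  have hndA : (mapping.items.map (fun p => (p.2, p.1))).Nodup := by
    have hitems : mapping.items.Nodup := List.Nodup.of_map _ hnodk
    exact hitems.map (fun a b hab => by
      have h1 : a.2 = b.2 := congrArg Prod.fst hab
      have h2 : a.1 = b.1 := congrArg Prod.snd hab
      exact Prod.ext h2 h1)
  have hrpair : r.Pairwise (fun a b => b.1 < a.1) :=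
    List.pairwise_reverse.mpr (by simpa using PySem.List.pairwise_lt_enumerate xtbls 0)
  have hpickpair : (pickFirst (PySem.Set.ofList []) r).Pairwise (fun a b => b.1 < a.1) :=
    hrpair.sublist (pickFirst_sublist _ r)
  have hBpair : ((pickFirst (PySem.Set.ofList []) r).reverse).Pairwise
      (fun a b => a.1 < b.1) := List.pairwise_reverse.mpr hpickpair
  have hndB : ((pickFirst (PySem.Set.ofList []) r).reverse).Nodup :=
    hBpair.imp (fun h => by intro hab; rw [hab] at h; omega)
  -- permutation, then rigidity of the sorted order
  have hperm : (mapping.items.map (fun p => (p.2, p.1))).Perm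
      ((pickFirst (PySem.Set.ofList []) r).reverse) := by
    rw [List.perm_ext_iff_of_nodup hndA hndB]
    intro v; rw [hmemA v, hmemB v]
  exact PySem.List.eq_of_perm_of_pairwise_le_of_pairwise_lt (fun v => v.1)
    ((PySem.List.sorted2_perm _ _ _ _).trans hperm)
    (sorted2_fst_pairwise _) hBpair
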